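-- pv_equiv track=rewrite | github.com/darshanpyadav/DSA | arrays/perfect-peak-of-array.py | perfectPeak
-- ===== SOURCE A (Python) =====
-- def perfectPeak(A):
--     n = len(A)
--
--     if n <= 2:
--         return 0
--
--     min_arr = [0]*(n-1) + [A[-1]]
--     max_arr = [A[0]] + [0]*(n-1)
--
--     for i in range(1, n):
--         max_arr[i] = max(A[i], max_arr[i-1])
--
--     for i in range(n-2, -1, -1):
--         min_arr[i] = min(min_arr[i+1], A[i])
--
--     for i in range(1, n-1):
--         if max_arr[i-1] < A[i] < min_arr[i+1]:
--             return 1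
--
--     return 0
-- ===== SOURCE B (Python) =====
-- def perfectPeak(A):
--     n = len(A)
--     if n <= 2:
--         return 0
--     # Single forward pass, O(1) extra space: keep the earliest still-live candidate.
--     # An element becomes the candidate when it exceeds everything seen so far; the
--     # candidate is discarded as soon as a later element fails to exceed it.  A live
--     # candidate with at least one element after it is a perfect peak.
--     run_max = A[0]
--     cand = None
--     cand_ok = False
--     for x in A[1:]:
--         if cand is not None:
--             if x <= cand:
--                 cand = None
--                 cand_ok = False
--             else:
--                 cand_ok = True
--         elif x > run_max:
--             cand = x
--         if x > run_max:
--             run_max = x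
--     return 1 if cand is not None and cand_ok else 0
-- ===== Notes on version B (the rewrite author's own statement) =====
-- stated objective: alternative
-- what changed: B abandons A's precomputed prefix-max and suffix-min arrays entirely: it makes one forward pass in O(1) extra space, tracking the earliest still-live candidate (an element exceeding everything before it) and discarding it as soon as a later element fails to exceed it; a candidate alive at the end with an element after it is the peak.
import Mathlib
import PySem

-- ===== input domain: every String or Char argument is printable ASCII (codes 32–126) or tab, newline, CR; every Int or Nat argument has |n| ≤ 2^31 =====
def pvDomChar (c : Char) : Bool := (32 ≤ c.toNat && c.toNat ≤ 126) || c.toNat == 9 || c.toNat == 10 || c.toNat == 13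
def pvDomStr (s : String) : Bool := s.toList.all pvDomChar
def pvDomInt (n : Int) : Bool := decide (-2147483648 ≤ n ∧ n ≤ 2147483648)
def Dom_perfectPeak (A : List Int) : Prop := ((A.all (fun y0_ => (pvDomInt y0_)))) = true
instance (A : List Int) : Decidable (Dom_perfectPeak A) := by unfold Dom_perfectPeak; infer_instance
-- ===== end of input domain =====

-- B replaces A's three array-building passes by ONE forward pass in O(1) extra space:
-- it tracks the earliest still-live candidate (an element exceeding everything before it)
-- and discards it when a later element fails to exceed it (objective: alternative).

-- ===== PORT A =====
-- All list indexing in A is in range when n ≥ 3, so the total pyGetD (default 0) is exact here.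
def perfectPeak (A : List Int) : Int :=
  let n : Int := A.length
  if n ≤ 2 then 0
  else
    let minArr0 : List Int := List.replicate (A.length - 1) (0:Int) ++ [PySem.List.pyGetD A (-1) 0]
    let maxArr0 : List Int := [PySem.List.pyGetD A 0 0] ++ List.replicate (A.length - 1) (0:Int)
    let maxArr := (PySem.List.pyRange 1 n 1).foldl
      (fun m i => PySem.List.pySetD m i (max (PySem.List.pyGetD A i 0) (PySem.List.pyGetD m (i-1) 0))) maxArr0
    let minArr := (PySem.List.pyRange (n-2) (-1) (-1)).foldl
      (fun m i => PySem.List.pySetD m i (min (PySem.List.pyGetD m (i+1) 0) (PySem.List.pyGetD A i 0))) minArr0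
    if (PySem.List.pyRange 1 (n-1) 1).any (fun i =>
        decide (PySem.List.pyGetD maxArr (i-1) 0 < PySem.List.pyGetD A i 0 ∧
                PySem.List.pyGetD A i 0 < PySem.List.pyGetD minArr (i+1) 0)) then 1 else 0

-- ===== PORT B =====
-- Source B's loop over A[1:]: state = (run_max, cand, cand_ok); early candidate kept while live
def pvScanC : List Int → Int → Option Int → Bool → Int
  | [], _, cand, candOk => if cand.isSome ∧ candOk then 1 else 0
  | x :: rest, runMax, cand, candOk =>
    let s : Option Int × Bool :=
      match cand with
      | some c => if x ≤ c then (none, false) else (some c, true)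
      | none => if runMax < x then (some x, candOk) else (none, candOk)
    pvScanC rest (if runMax < x then x else runMax) s.1 s.2

def perfectPeak_alt (A : List Int) : Int :=
  if A.length ≤ 2 then 0
  else pvScanC (PySem.List.slice A (some 1) none) (PySem.List.pyGetD A 0 0) none false

-- ===== PRECONDITION & SPEC =====
def Spec_perfectPeak (A : List Int) (out : Int) : Prop := out = perfectPeak_alt A
instance (A : List Int) (out : Int) : Decidable (Spec_perfectPeak A out) := by unfold Spec_perfectPeak; infer_instance

-- ===== CLAIM (what is proved, stated in full; the proofs are below) =====
def Claim_equal_perfectPeak : Prop := ∀ (A : List Int), Dom_perfectPeak A → Spec_perfectPeak A (perfectPeak A)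

-- ===== LEMMAS AND PROOFS =====

-- max / min of a nonempty list, as Python's running fold computes them
def pmax : List Int → Int
  | [] => 0
  | x :: xs => xs.foldl max x

def pmin : List Int → Int
  | [] => 0
  | x :: xs => xs.foldl min x

theorem foldl_min_cons (l : List Int) : ∀ a b, l.foldl min (min a b) = min a (l.foldl min b) := by
  induction l with
  | nil => intro a b; rfl
  | cons x t ih =>
    intro a b
    simp only [List.foldl_cons, min_assoc]
    exact ih a (min b x)

theorem pmin_cons (x : Int) (l : List Int) (h : l ≠ []) : pmin (x :: l) = min x (pmin l) := by
  cases l with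
  | nil => simp at h
  | cons y t => simp only [pmin, List.foldl_cons]; exact foldl_min_cons t x y

theorem pmax_snoc (l : List Int) (h : l ≠ []) (y : Int) : pmax (l ++ [y]) = max (pmax l) y := by
  cases l with
  | nil => simp at h
  | cons x t => simp [pmax, List.foldl_append]

theorem mem_le_foldl_max : ∀ (l : List Int) (b : Int), b ≤ l.foldl max b ∧ ∀ x ∈ l, x ≤ l.foldl max b := by
  intro l
  induction l with
  | nil => intro b; exact ⟨le_refl b, by simp⟩
  | cons a t ih =>
    intro b
    simp only [List.foldl_cons]
    refine ⟨le_trans (le_max_left b a) (ih (max b a)).1, ?_⟩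
    intro x hx
    rcases List.mem_cons.mp hx with rfl | hx
    · exact le_trans (le_max_right b x) (ih (max b x)).1
    · exact (ih (max b a)).2 x hx

theorem le_pmax_of_mem {l : List Int} {x : Int} (h : x ∈ l) : x ≤ pmax l := by
  cases l with
  | nil => simp at h
  | cons a t =>
    rcases List.mem_cons.mp h with rfl | hx
    · exact (mem_le_foldl_max t x).1
    · exact (mem_le_foldl_max t a).2 x hx

theorem lt_foldl_min_iff : ∀ (l : List Int) (b a : Int), a < l.foldl min b ↔ a < b ∧ ∀ x ∈ l, a < x := by
  intro l
  induction l with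
  | nil => intro b a; simp
  | cons x t ih =>
    intro b a
    simp only [List.foldl_cons, ih, lt_min_iff, List.mem_cons]
    constructor
    · rintro ⟨⟨h1, h2⟩, h3⟩
      exact ⟨h1, fun y hy => by rcases hy with rfl | hy; exact h2; exact h3 y hy⟩
    · rintro ⟨h1, h2⟩
      exact ⟨⟨h1, h2 x (Or.inl rfl)⟩, fun y hy => h2 y (Or.inr hy)⟩

theorem lt_pmin_iff {l : List Int} (h : l ≠ []) (a : Int) : a < pmin l ↔ ∀ x ∈ l, a < x := by
  cases l with
  | nil => simp at h
  | cons c t =>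
    simp only [pmin, lt_foldl_min_iff, List.mem_cons]
    constructor
    · rintro ⟨h1, h2⟩ y hy
      rcases hy with rfl | hy
      · exact h1
      · exact h2 y hy
    · intro hall
      exact ⟨hall c (Or.inl rfl), fun y hy => hall y (Or.inr hy)⟩

-- ∀ over a dropped suffix, stated with indices
theorem forall_drop_iff (A : List Int) (i : Nat) (a : Int) :
    (∀ x ∈ A.drop (i+1), a < x) ↔ (∀ m, m < A.length → i < m → a < A.getD m 0) := by
  constructor
  · intro h m hm him
    have hlt : m - (i+1) < (A.drop (i+1)).length := by
      rw [List.length_drop]; omega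
    have hx : (A.drop (i+1))[m - (i+1)]'hlt ∈ A.drop (i+1) := List.getElem_mem hlt
    have he : (A.drop (i+1))[m - (i+1)]'hlt = A[m]'hm := by
      rw [List.getElem_drop]
      congr 1
      omega
    rw [List.getD_eq_getElem A 0 hm]
    exact he ▸ h _ hx
  · intro h x hx
    obtain ⟨t, ht, rfl⟩ := List.mem_iff_getElem.mp hx
    rw [List.getElem_drop]
    have hm : i + 1 + t < A.length := by
      rw [List.length_drop] at ht; omega
    have := h (i+1+t) hm (by omega)
    rwa [List.getD_eq_getElem A 0 hm] at this

-- "j is a live candidate looking at positions < k": record from the left, unbeaten so far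
def aliveP (A : List Int) (j k : Nat) : Prop :=
  pmax (A.take j) < A.getD j 0 ∧ ∀ m, m < k → j < m → A.getD j 0 < A.getD m 0

theorem aliveP_mono {A : List Int} {j k k' : Nat} (h : k ≤ k') (ha : aliveP A j k') : aliveP A j k :=
  ⟨ha.1, fun m hm hjm => ha.2 m (by omega) hjm⟩

-- the common specification: some interior index is a strict prefix-record and suffix-antirecord
def hasPeakB (A : List Int) : Bool :=
  (List.range A.length).any (fun j =>
    decide (1 ≤ j ∧ j + 1 < A.length ∧ pmax (A.take j) < A.getD j 0 ∧
      ∀ m, m < A.length → j < m → A.getD j 0 < A.getD m 0))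

theorem hasPeakB_iff (A : List Int) :
    hasPeakB A = true ↔ ∃ j, 1 ≤ j ∧ j + 1 < A.length ∧ aliveP A j A.length := by
  simp only [hasPeakB, List.any_eq_true, List.mem_range, decide_eq_true_eq, aliveP]
  constructor
  · rintro ⟨j, _, h1, h2, h3, h4⟩; exact ⟨j, h1, h2, h3, h4⟩
  · rintro ⟨j, h1, h2, h3, h4⟩; exact ⟨j, by omega, h1, h2, h3, h4⟩

-- elements already scanned are at most the running maximum
theorem getD_le_pmax_take (A : List Int) {j k : Nat} (hjk : j < k) (hk : k ≤ A.length) :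
    A.getD j 0 ≤ pmax (A.take k) := by
  have hj : j < A.length := by omega
  have hjt : j < (A.take k).length := by rw [List.length_take]; omega
  have hmem : (A.take k)[j]'hjt ∈ A.take k := List.getElem_mem hjt
  have he : (A.take k)[j]'hjt = A[j]'hj := List.getElem_take
  rw [List.getD_eq_getElem A 0 hj, ← he]
  exact le_pmax_of_mem hmem

theorem take_succ_eq (A : List Int) {k : Nat} (hk : k < A.length) :
    A.take (k+1) = A.take k ++ [A[k]'hk] := by
  rw [List.take_add_one, List.getElem?_eq_getElem hk]
  rfl

theorem take_ne_nil (A : List Int) {k : Nat} (h1 : 1 ≤ k) (h2 : k ≤ A.length) :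
    A.take k ≠ [] := by
  intro hnil
  rcases List.take_eq_nil_iff.mp hnil with h | h
  · omega
  · rw [h] at h2; simp at h2; omega

-- the fused scan returns 1 exactly when a perfect peak exists (invariant proof)
theorem scanC_inv (A : List Int) : ∀ (rest : List Int) (k : Nat) (cand : Option Int) (candOk : Bool),
    rest = A.drop k → 1 ≤ k → k ≤ A.length →
    (∀ c, cand = some c → ∃ j, 1 ≤ j ∧ j < k ∧ c = A.getD j 0 ∧ aliveP A j k ∧
        candOk = decide (j + 1 < k) ∧ ∀ j', 1 ≤ j' → j' < j → ¬ aliveP A j' k) →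
    (cand = none → candOk = false ∧ ∀ j, 1 ≤ j → j < k → ¬ aliveP A j k) →
    pvScanC rest (pmax (A.take k)) cand candOk = if hasPeakB A then 1 else 0 := by
  intro rest
  induction rest with
  | nil =>
    intro k cand candOk hrest hk1 hkle hsome hnone
    have hke : k = A.length := by
      have := List.drop_eq_nil_iff.mp hrest.symm
      omega
    subst hke
    cases cand with
    | none =>
      obtain ⟨hok, hno⟩ := hnone rfl
      subst hok
      simp only [pvScanC, Option.isSome_none]
      rw [if_neg (by simp), if_neg]
      intro hp
      obtain ⟨j, h1, h2, h3⟩ := (hasPeakB_iff A).mp hp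
      exact hno j h1 (by omega) h3
    | some c =>
      obtain ⟨j, hj1, hjk, hc, hal, hok, hmin⟩ := hsome c rfl
      cases candOk with
      | true =>
        have hjk1 : j + 1 < A.length := by
          have := hok.symm
          simpa using this
        simp only [pvScanC, Option.isSome_some]
        rw [if_pos (by simp), if_pos ((hasPeakB_iff A).mpr ⟨j, hj1, hjk1, hal⟩)]
      | false =>
        have hjk1 : ¬ (j + 1 < A.length) := by
          have := hok.symm
          simpa using this
        simp only [pvScanC, Option.isSome_some]
        rw [if_neg (by simp), if_neg]
        intro hp
        obtain ⟨i, hi1, hi2, hial⟩ := (hasPeakB_iff A).mp hp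
        have : i < j := by omega
        exact hmin i hi1 this hial
  | cons x rest' ih =>
    intro k cand candOk hrest hk1 hkle hsome hnone
    have hklt : k < A.length := by
      by_contra h
      rw [List.drop_eq_nil_iff.mpr (by omega)] at hrest
      simp at hrest
    have hdrop : A.drop k = A[k]'hklt :: A.drop (k+1) := List.drop_eq_getElem_cons hklt
    rw [hdrop] at hrest
    obtain ⟨hx, hrest'⟩ : x = A[k]'hklt ∧ rest' = A.drop (k+1) := by
      constructor <;> [exact (List.cons.injEq _ _ _ _ ▸ hrest).1; exact (List.cons.injEq _ _ _ _ ▸ hrest).2]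
    have hxg : x = A.getD k 0 := by rw [hx, List.getD_eq_getElem A 0 hklt]
    have hRmax : (if pmax (A.take k) < x then x else pmax (A.take k)) = pmax (A.take (k+1)) := by
      rw [take_succ_eq A hklt, pmax_snoc _ (take_ne_nil A hk1 (by omega)), ← hx, max_def]
      split_ifs <;> omega
    simp only [pvScanC]
    rw [hRmax]
    cases cand with
    | some c =>
      dsimp only
      obtain ⟨j, hj1, hjk, hc, hal, hok, hmin⟩ := hsome c rfl
      by_cases hxc : x ≤ c
      · rw [if_pos hxc]
        apply ih (k+1) none false hrest' (by omega) (by omega)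
        · intro c' hc'; simp at hc'
        · intro _
          refine ⟨rfl, ?_⟩
          intro j' h1 h2 hal'
          have hal'k : aliveP A j' k := aliveP_mono (by omega) hal'
          rcases Nat.lt_trichotomy j' j with hlt | heq | hgt
          · exact hmin j' h1 hlt hal'k
          · subst heq
            have := hal'.2 k (by omega) hjk
            rw [← hxg, ← hc] at this
            omega
          · rcases Nat.lt_or_ge j' k with hj'k | hj'k
            · have h1' := hal.2 j' hj'k hgt
              have h2' := hal'.2 k (by omega) hj'k
              rw [← hxg] at h2'
              rw [← hc] at h1'
              omega
            · have hj'e : j' = k := by omega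
              subst hj'e
              have hp := hal'.1
              have hle : A.getD j 0 ≤ pmax (A.take j') := getD_le_pmax_take A hjk (by omega)
              rw [← hc] at hle
              rw [← hxg] at hp
              omega
      · rw [if_neg hxc]
        apply ih (k+1) (some c) true hrest' (by omega) (by omega)
        · intro c' hc'
          have : c' = c := by simpa using hc'.symm
          subst this
          refine ⟨j, hj1, by omega, hc, ?_, ?_, ?_⟩
          · refine ⟨hal.1, ?_⟩
            intro m hm hjm
            rcases Nat.lt_or_ge m k with hmk | hmk
            · exact hal.2 m hmk hjm
            · have : m = k := by omega
              subst this
              rw [← hc, ← hxg]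
              omega
          · simp; omega
          · intro j' h1 h2 hal'
            exact hmin j' h1 h2 (aliveP_mono (by omega) hal')
        · intro h; simp at h
    | none =>
      dsimp only
      obtain ⟨hok, hno⟩ := hnone rfl
      subst hok
      by_cases hRx : pmax (A.take k) < x
      · rw [if_pos hRx]
        apply ih (k+1) (some x) false hrest' (by omega) (by omega)
        · intro c' hc'
          have : c' = x := by simpa using hc'.symm
          subst this
          refine ⟨k, hk1, by omega, hxg, ⟨by rw [← hxg]; exact hRx, ?_⟩, by simp, ?_⟩
          · intro m hm hkm; omega
          · intro j' h1 h2 hal'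
            exact hno j' h1 h2 (aliveP_mono (by omega) hal')
        · intro h; simp at h
      · rw [if_neg hRx]
        apply ih (k+1) none false hrest' (by omega) (by omega)
        · intro c' hc'; simp at hc'
        · intro _
          refine ⟨rfl, ?_⟩
          intro j' h1 h2 hal'
          rcases Nat.lt_or_ge j' k with hj'k | hj'k
          · exact hno j' h1 hj'k (aliveP_mono (by omega) hal')
          · have : j' = k := by omega
            subst this
            have := hal'.1
            rw [← hxg] at this
            omega

-- congruence for List.any
theorem any_congr' (l : List Int) (f g : Int → Bool)
    (h : ∀ x ∈ l, f x = g x) : l.any f = l.any g := by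
  induction l with
  | nil => rfl
  | cons x t ih =>
    simp only [List.any_cons, h x (by simp), ih (fun y hy => h y (by simp [hy]))]

-- j-indexed entries of the A-side prefix-max fold
theorem maxloop (A : List Int) : ∀ (d k : Nat) (m : List Int),
    1 ≤ k → k + d = A.length → m.length = A.length →
    (∀ j : Nat, j < k → m.getD j 0 = pmax (A.take (j+1))) →
    ∀ j : Nat, j < A.length →
      ((PySem.List.pyRange (k:Int) (A.length:Int) 1).foldl
        (fun m i => PySem.List.pySetD m i
          (max (PySem.List.pyGetD A i 0) (PySem.List.pyGetD m (i-1) 0))) m).getD j 0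
      = pmax (A.take (j+1)) := by
  intro d
  induction d with
  | zero =>
    intro k m hk hkd hm hinv j hj
    rw [PySem.List.pyRange_one_eq_nil (by omega)]
    exact hinv j (by omega)
  | succ d ih =>
    intro k m hk hkd hm hinv j hj
    rw [PySem.List.pyRange_one_cons (by exact_mod_cast (by omega : (k:Int) < (A.length:Int)))]
    simp only [List.foldl_cons]
    have hklt : k < A.length := by omega
    have hcast : ((k:Int) + 1) = ((k+1 : Nat) : Int) := by push_cast; ring
    rw [hcast]
    apply ih (k+1) _ (by omega) (by omega) _ _ j hj
    · simp [PySem.List.pySetD_natCast, hm]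
    · intro j' hj'
      have hv : PySem.List.pySetD m (k:Int)
          (max (PySem.List.pyGetD A (k:Int) 0) (PySem.List.pyGetD m ((k:Int)-1) 0))
          = m.set k (max (A.getD k 0) (m.getD (k-1) 0)) := by
        have h1 : ((k:Int) - 1) = ((k-1 : Nat) : Int) := by push_cast [hk]; ring
        rw [h1]
        simp [PySem.List.pySetD_natCast, PySem.List.pyGetD_natCast]
      rw [hv]
      rcases Nat.lt_or_ge j' k with hlt | hge
      · rw [List.getD, List.getElem?_set_ne (by omega)]
        exact hinv j' hlt
      · have hj'k : j' = k := by omega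
        subst hj'k
        rw [List.getD, List.getElem?_set_self (by omega), Option.getD_some]
        have htake : A.take (j'+1) = A.take j' ++ [A[j']'hklt] := take_succ_eq A hklt
        rw [htake, pmax_snoc _ (take_ne_nil A hk (by omega))]
        rw [hinv (j'-1) (by omega), Nat.sub_add_cancel hk,
            List.getD_eq_getElem A 0 hklt, max_comm]

-- j-indexed entries of the A-side suffix-min fold (descending range)
theorem minloop (A : List Int) : ∀ (d : Nat) (k : Int) (m : List Int),
    k + 1 = (d:Int) → k ≤ (A.length:Int) - 2 → m.length = A.length →
    (∀ j : Nat, k < (j:Int) → j < A.length → m.getD j 0 = pmin (A.drop j)) →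
    ∀ j : Nat, j < A.length →
      ((PySem.List.pyRange k (-1) (-1)).foldl
        (fun m i => PySem.List.pySetD m i
          (min (PySem.List.pyGetD m (i+1) 0) (PySem.List.pyGetD A i 0))) m).getD j 0
      = pmin (A.drop j) := by
  intro d
  induction d with
  | zero =>
    intro k m hkd hk hm hinv j hj
    rw [PySem.List.pyRange_neg_one_eq_nil (by omega)]
    exact hinv j (by omega) hj
  | succ d ih =>
    intro k m hkd hk hm hinv j hj
    have hk0 : k = (d:Int) := by omega
    rw [PySem.List.pyRange_neg_one_cons (by omega)]
    simp only [List.foldl_cons]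
    apply ih (k-1) _ (by omega) (by omega) _ _ j hj
    · rw [hk0]; simp [PySem.List.pySetD_natCast, hm]
    · intro j' hj1 hj2
      have hdlt : d < A.length := by omega
      have hd1lt : d + 1 < A.length := by omega
      have hv : PySem.List.pySetD m k
          (min (PySem.List.pyGetD m (k+1) 0) (PySem.List.pyGetD A k 0))
          = m.set d (min (m.getD (d+1) 0) (A.getD d 0)) := by
        have h1 : k + 1 = ((d+1 : Nat) : Int) := by push_cast; omega
        rw [h1, hk0, PySem.List.pySetD_natCast, PySem.List.pyGetD_natCast,
            PySem.List.pyGetD_natCast]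
      rw [hv]
      rcases Nat.lt_or_ge d j' with hlt | hge
      · rw [List.getD, List.getElem?_set_ne (by omega)]
        exact hinv j' (by omega) hj2
      · have hj'd : j' = d := by omega
        subst hj'd
        rw [List.getD, List.getElem?_set_self (by omega), Option.getD_some]
        rw [hinv (j'+1) (by omega) hd1lt]
        rw [List.getD_eq_getElem A 0 hdlt]
        have hdrop : A.drop j' = A[j']'hdlt :: A.drop (j'+1) :=
          List.drop_eq_getElem_cons hdlt
        rw [hdrop, pmin_cons _ _ (by
              intro hnil
              have := List.drop_eq_nil_iff.mp hnil
              omega), min_comm]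

-- A's interior test at Nat index i equals the aliveP form used by the scan spec
theorem cond_iff_alive (A : List Int) (i : Nat) (_h1 : 1 ≤ i) (h2 : i + 1 < A.length) :
    (pmax (A.take i) < A.getD i 0 ∧ A.getD i 0 < pmin (A.drop (i+1))) ↔ aliveP A i A.length := by
  unfold aliveP
  have hne : A.drop (i+1) ≠ [] := by
    intro hnil
    have := List.drop_eq_nil_iff.mp hnil
    omega
  rw [lt_pmin_iff hne, forall_drop_iff]

-- A's `any` over the interior range equals hasPeakB
theorem anyCond_eq_hasPeak (A : List Int) :
    ((PySem.List.pyRange 1 ((A.length:Int)-1) 1).any (fun i =>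
      decide (pmax (A.take i.toNat) < A.getD i.toNat 0 ∧
              A.getD i.toNat 0 < pmin (A.drop (i.toNat+1))))) = hasPeakB A := by
  rcases Bool.eq_false_or_eq_true (hasPeakB A) with hb | hb <;> rw [hb]
  · obtain ⟨j, h1, h2, hal⟩ := (hasPeakB_iff A).mp hb
    rw [List.any_eq_true]
    refine ⟨(j:Int), ?_, ?_⟩
    · rw [PySem.List.mem_pyRange_one]
      constructor <;> [exact_mod_cast h1; omega]
    · simp only [Int.toNat_natCast, decide_eq_true_eq]
      exact (cond_iff_alive A j h1 h2).mpr hal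
  · rw [List.any_eq_false]
    intro i hi
    rw [PySem.List.mem_pyRange_one] at hi
    simp only [decide_eq_true_eq] at *
    intro hcond
    have h1 : 1 ≤ i.toNat := by omega
    have h2 : i.toNat + 1 < A.length := by omega
    have := (hasPeakB_iff A).mpr ⟨i.toNat, h1, h2, (cond_iff_alive A i.toNat h1 h2).mp (by simpa using hcond)⟩
    rw [hb] at this
    exact absurd this (by simp)

-- ===== VERDICT (by name: the statement is the Claim_ definition above) =====
theorem perfectPeak_spec : Claim_equal_perfectPeak := by
  intro A _
  unfold Spec_perfectPeak
  by_cases hsmall : A.length ≤ 2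
  · simp only [perfectPeak, perfectPeak_alt]
    rw [if_pos (by exact_mod_cast hsmall), if_pos hsmall]
  · have hn : 3 ≤ A.length := by omega
    have hne : A ≠ [] := by intro h; rw [h] at hn; simp at hn
    simp only [perfectPeak, perfectPeak_alt]
    rw [if_neg (by omega), if_neg hsmall]
    -- A side: rewrite the array entries into pmax/pmin and fold into hasPeakB
    rw [PySem.List.pyGetD_neg_one (h := hne), PySem.List.pyGetD_zero]
    have h01 : pmax (A.take 1) = A.getD 0 0 := by
      cases A with
      | nil => exact absurd rfl hne
      | cons a t => simp [pmax]
    have hmaxA : ∀ jj : Nat, jj < A.length →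
        ((PySem.List.pyRange 1 (A.length:Int) 1).foldl
          (fun m i => PySem.List.pySetD m i
            (max (PySem.List.pyGetD A i 0) (PySem.List.pyGetD m (i-1) 0)))
          ([A.getD 0 0] ++ List.replicate (A.length - 1) 0)).getD jj 0
        = pmax (A.take (jj+1)) := by
      have := maxloop A (A.length - 1) 1 ([A.getD 0 0] ++ List.replicate (A.length - 1) 0)
        (le_refl 1) (by omega) (by simp; omega)
        (by intro jj hjj
            have : jj = 0 := by omega
            subst this
            simpa using h01.symm)
      simpa using this
    have hminA : ∀ jj : Nat, jj < A.length →
        ((PySem.List.pyRange ((A.length:Int) - 2) (-1) (-1)).foldl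
          (fun m i => PySem.List.pySetD m i
            (min (PySem.List.pyGetD m (i+1) 0) (PySem.List.pyGetD A i 0)))
          (List.replicate (A.length - 1) 0 ++ [A.getLast hne])).getD jj 0
        = pmin (A.drop jj) := by
      have hlast : A.getLast hne = pmin (A.drop (A.length - 1)) := by
        have h1 : A.length - 1 < A.length := by omega
        have hdrop : A.drop (A.length - 1) = [A[A.length - 1]'h1] := by
          rw [List.drop_eq_getElem_cons h1]
          congr 1
          have : A.length - 1 + 1 = A.length := by omega
          rw [this, List.drop_length]
        rw [hdrop, List.getLast_eq_getElem]
        rfl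
      have := minloop A (A.length - 1) ((A.length:Int) - 2)
        (List.replicate (A.length - 1) 0 ++ [A.getLast hne])
        (by push_cast [(by omega : 1 ≤ A.length)]; ring) (by omega) (by simp; omega)
        (by intro jj hjj1 hjj2
            have : jj = A.length - 1 := by omega
            subst this
            rw [List.getD, List.getElem?_append_right (by simp)]
            simpa using hlast)
      exact this
    have hAany :
        ((PySem.List.pyRange 1 ((A.length:Int)-1) 1).any (fun i =>
          decide (PySem.List.pyGetD
              ((PySem.List.pyRange 1 (A.length:Int) 1).foldl
                (fun m i => PySem.List.pySetD m i
                  (max (PySem.List.pyGetD A i 0) (PySem.List.pyGetD m (i-1) 0)))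
                ([A.getD 0 0] ++ List.replicate (A.length - 1) 0)) (i-1) 0 < PySem.List.pyGetD A i 0 ∧
            PySem.List.pyGetD A i 0 < PySem.List.pyGetD
              ((PySem.List.pyRange ((A.length:Int) - 2) (-1) (-1)).foldl
                (fun m i => PySem.List.pySetD m i
                  (min (PySem.List.pyGetD m (i+1) 0) (PySem.List.pyGetD A i 0)))
                (List.replicate (A.length - 1) 0 ++ [A.getLast hne])) (i+1) 0)))
        = hasPeakB A := by
      rw [← anyCond_eq_hasPeak A]
      apply any_congr'
      intro i hi
      rw [PySem.List.mem_pyRange_one] at hi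
      have h0i : 0 ≤ i := by omega
      have hij : ((i.toNat : Nat) : Int) = i := Int.toNat_of_nonneg h0i
      have h1j : 1 ≤ i.toNat := by omega
      have h2j : i.toNat + 1 < A.length := by omega
      rw [← hij]
      rw [show ((i.toNat:Int) - 1) = ((i.toNat - 1 : Nat) : Int) by push_cast [h1j]; ring]
      rw [show ((i.toNat:Int) + 1) = ((i.toNat + 1 : Nat) : Int) by push_cast; ring]
      simp only [PySem.List.pyGetD_natCast]
      rw [List.getD_eq_getElem?_getD, List.getD_eq_getElem?_getD]
      rw [← List.getD, ← List.getD]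
      rw [hmaxA (i.toNat - 1) (by omega), hminA (i.toNat + 1) (by omega),
          Nat.sub_add_cancel h1j]
      simp [max_eq_left h0i]
    rw [hAany]
    -- B side: start the scan with k = 1
    rw [PySem.List.slice_from_one, ← List.drop_one]
    rw [show A.getD 0 0 = pmax (A.take 1) from h01.symm]
    rw [scanC_inv A (A.drop 1) 1 none false rfl (le_refl 1) (by omega)
        (by intro c hc; simp at hc)
        (by intro _; exact ⟨rfl, by intro j h1 h2 _; omega⟩)]
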